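-- pv_equiv track=rewrite | github.com/heleownae/AlQuerythm | 030회차/repainting_SSH.py | solution
-- ===== SOURCE A (Python) =====
-- def solution(n, m, section):
--     count = 0
--     i = 0
--     while i < len(section):
--         count += 1
--         # 현재 위치 section[i]를 시작으로 m 범위를 덮음
--         start = section[i]
--         # start + m까지 덮을 수 있으므로 그 범위 안에 있는 항목들을 무시하고 넘어감
--         while i < len(section) and section[i] < start + m:
--             i += 1
--     return count
-- ===== SOURCE B (Python) =====
-- def solution(n, m, section):
--     count = 0
--     rest = section
--     while rest:
--         count += 1
--         limit = rest[0] + m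
--         i = next((j for j, x in enumerate(rest) if x >= limit), len(rest))
--         rest = rest[i:]
--     return count
-- ===== Notes on version B (the rewrite author's own statement) =====
-- stated objective: alternative
-- what changed: B works by repeated list splitting: each step takes the current list, finds the index of the first element reaching head+m (next over enumerate) and continues on the sliced-off suffix; A instead walks one index pointer through the list with a nested skip loop.
import Mathlib
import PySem

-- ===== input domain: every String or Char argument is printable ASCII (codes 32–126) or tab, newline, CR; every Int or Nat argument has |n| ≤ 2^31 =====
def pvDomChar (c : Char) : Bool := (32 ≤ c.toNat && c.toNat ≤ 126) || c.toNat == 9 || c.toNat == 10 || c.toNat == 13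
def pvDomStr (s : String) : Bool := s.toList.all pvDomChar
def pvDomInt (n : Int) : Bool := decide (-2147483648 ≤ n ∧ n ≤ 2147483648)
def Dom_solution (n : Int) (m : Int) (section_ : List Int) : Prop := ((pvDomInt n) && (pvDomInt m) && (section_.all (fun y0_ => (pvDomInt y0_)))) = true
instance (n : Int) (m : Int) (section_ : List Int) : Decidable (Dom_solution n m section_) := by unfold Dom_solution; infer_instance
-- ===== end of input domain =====

-- B replaces A's index-pointer walk (outer loop + nested skip loop) by repeated
-- list splitting: find the first element reaching head+m, continue on the sliced
-- suffix (objective: alternative decomposition, same return value).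

-- ===== PORT A =====
-- inner while loop: advance i while i < len(section) and section[i] < start + m
def solutionSkipA (m : Int) (sec : List Int) (start : Int) (i : Nat) : Nat :=
  if h : i < sec.length then
    if sec[i] < start + m then solutionSkipA m sec start (i+1) else i
  else i
termination_by sec.length - i

-- outer while loop; the fuel parameter only makes the recursion total in Lean:
-- on Pre_ inputs (m > 0 or empty list) fuel sec.length + 1 is never exhausted.
def solutionLoopA (m : Int) (sec : List Int) : Nat → Nat → Int → Int
  | 0, _, count => count
  | fuel+1, i, count =>
    if h : i < sec.length then
      solutionLoopA m sec fuel (solutionSkipA m sec (sec[i]) i) (count + 1)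
    else count

def solution (n : Int) (m : Int) (section_ : List Int) : Int :=
  solutionLoopA m section_ (section_.length + 1) 0 0

-- ===== PORT B =====
-- while rest: count += 1; i = first index with rest[i] >= rest[0] + m (default
-- len(rest), via next/enumerate = findIdx); rest = rest[i:].  Fuel makes the
-- loop total in Lean; on Pre_ inputs fuel length + 1 is never exhausted.
def solutionLoopB (m : Int) : Nat → List Int → Int → Int
  | 0, _, count => count
  | _+1, [], count => count
  | fuel+1, x :: t, count =>
    let limit := x + m
    let i := (x :: t).findIdx (fun y => decide (limit ≤ y))
    solutionLoopB m fuel ((x :: t).drop i) (count + 1)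

def solution_alt (n : Int) (m : Int) (section_ : List Int) : Int :=
  solutionLoopB m (section_.length + 1) section_ 0

-- ===== PRECONDITION & SPEC =====
-- Pre_ excludes exactly the inputs on which Python A loops forever (never returns):
-- a non-empty section with m ≤ 0, where the inner while never advances i.
def Pre_solution (n : Int) (m : Int) (section_ : List Int) : Prop :=
  section_ = [] ∨ 0 < m
instance (n : Int) (m : Int) (section_ : List Int) : Decidable (Pre_solution n m section_) := by
  unfold Pre_solution; infer_instance

def pvWitness_solution : Int × Int × List Int := (5, 2, [1, 2, 4, 9])

def Spec_solution (n : Int) (m : Int) (section_ : List Int) (out : Int) : Prop := out = solution_alt n m section_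
instance (n : Int) (m : Int) (section_ : List Int) (out : Int) : Decidable (Spec_solution n m section_ out) := by unfold Spec_solution; infer_instance

-- ===== CLAIM (what is proved, stated in full; the proofs are below) =====
def Claim_equal_solution : Prop := ∀ (n : Int) (m : Int) (section_ : List Int), Dom_solution n m section_ → Pre_solution n m section_ → Spec_solution n m section_ (solution n m section_)

-- ===== LEMMAS AND PROOFS =====

-- the skip index never moves backwards
theorem solutionSkipA_le (m : Int) (sec : List Int) (start : Int) (i : Nat) :
    i ≤ solutionSkipA m sec start i := by
  fun_induction solutionSkipA m sec start i with
  | case1 i h hlt ih => omega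
  | case2 i h hlt => exact Nat.le_refl i
  | case3 i h => exact Nat.le_refl i

-- what remains after the inner skip loop is dropWhile (· < start + m) of what remained
theorem solutionSkipA_drop (m : Int) (sec : List Int) (start : Int) (i : Nat) :
    sec.drop (solutionSkipA m sec start i)
      = (sec.drop i).dropWhile (fun x => decide (x < start + m)) := by
  fun_induction solutionSkipA m sec start i with
  | case1 i h hlt ih =>
      rw [ih, ← List.getElem_cons_drop h, List.dropWhile_cons]
      simp [hlt]
  | case2 i h hlt =>
      rw [← List.getElem_cons_drop h, List.dropWhile_cons]
      simp [hlt, List.getElem_cons_drop]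
  | case3 i h =>
      have : sec.length ≤ i := by omega
      simp [List.drop_eq_nil_of_le this]

-- with m > 0 the skip loop advances at least once when started at its own element
theorem solutionSkipA_advance (m : Int) (sec : List Int) (i : Nat)
    (h : i < sec.length) (hm : 0 < m) :
    i + 1 ≤ solutionSkipA m sec (sec[i]) i := by
  rw [solutionSkipA]
  simp only [h, dif_pos]
  have : sec[i] < sec[i] + m := by omega
  rw [if_pos this]
  exact solutionSkipA_le m sec (sec[i]) (i+1)

-- dropping up to the first element ≥ l is dropping while below l
theorem drop_findIdx_eq_dropWhile (l : Int) (xs : List Int) :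
    xs.drop (xs.findIdx (fun y => decide (l ≤ y)))
      = xs.dropWhile (fun y => decide (y < l)) := by
  induction xs with
  | nil => rfl
  | cons x t ih =>
      by_cases hx : l ≤ x
      · simp [List.findIdx_cons, List.dropWhile_cons, hx, not_lt.mpr hx]
      · have hlt : x < l := by omega
        simp [List.findIdx_cons, List.dropWhile_cons, hx, hlt, ih]

-- main correspondence: A's outer loop from index i equals B's loop on the suffix
theorem loopA_eq_loopB (m : Int) (sec : List Int) (hm : 0 < m) :
    ∀ fuel i count, sec.length - i < fuel →
      solutionLoopA m sec fuel i count = solutionLoopB m fuel (sec.drop i) count := by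
  intro fuel
  induction fuel with
  | zero => intro i count h; omega
  | succ fuel ih =>
      intro i count hfuel
      rw [solutionLoopA]
      by_cases h : i < sec.length
      · simp only [h, dif_pos]
        have hadv := solutionSkipA_advance m sec i h hm
        rw [ih _ _ (by omega)]
        rw [← List.getElem_cons_drop h, solutionLoopB]
        have hhead : ¬ (sec[i] + m ≤ sec[i]) := by omega
        simp only [List.getElem_cons_drop]
        rw [drop_findIdx_eq_dropWhile (sec[i] + m)]
        rw [solutionSkipA_drop, ← List.getElem_cons_drop h, List.dropWhile_cons]
      · rw [List.drop_eq_nil_of_le (by omega : sec.length ≤ i)]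
        simp only [h, dif_neg, not_false_iff]
        rfl

-- ===== VERDICT (by name: the statement is the Claim_ definition above) =====
theorem solution_spec : Claim_equal_solution := by
  intro n m section_ _ hpre
  unfold Spec_solution solution solution_alt
  rcases hpre with hnil | hm
  · subst hnil; rfl
  · rw [loopA_eq_loopB m section_ hm (section_.length + 1) 0 0 (by omega)]
    simp
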